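-- pv_equiv track=rewrite | github.com/sasucg/Licenta- | freeTime.py | check_if_hours_valid
-- ===== SOURCE A (Python) =====
-- def check_if_hours_valid(hours_start, hours_over):
--     for hour_s, hour_o in zip(hours_start, hours_over):
--         if (hour_s >= hour_o):
--             error_message = "Ora de inceput a unei ore de curs nu poate fi mai mare decat cea de sfarsit!"
--             return False, error_message
--
--     if len(hours_start) > len(set(hours_start)) or len(hours_over) > len(set(hours_over)):
--         error_message = "Nu puteti incepe sau sfarsi doua ore de curs in acelasi timp!"
--         return False, error_message
--
--     interval_list = list(zip(hours_start, hours_over))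
--     interval_list = sorted(interval_list, key=lambda x: x[1])
--     for i in range(0, len(interval_list)-1):
--         if interval_list[i+1][0] < interval_list[i][1]:
--             error_message = "Intervalele orelor de curs se intersecteaza!"
--             return False, error_message
--     return True, None
-- ===== SOURCE B (Python) =====
-- def check_if_hours_valid(hours_start, hours_over):
--     if any(s >= e for s, e in zip(hours_start, hours_over)):
--         return False, "Ora de inceput a unei ore de curs nu poate fi mai mare decat cea de sfarsit!"
--     if len(set(hours_start)) < len(hours_start) or len(set(hours_over)) < len(hours_over):
--         return False, "Nu puteti incepe sau sfarsi doua ore de curs in acelasi timp!"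
--     intervals = list(zip(hours_start, hours_over))
--     for i in range(len(intervals)):
--         si, ei = intervals[i]
--         for j in range(i + 1, len(intervals)):
--             sj, ej = intervals[j]
--             if max(si, sj) < min(ei, ej):
--                 return False, "Intervalele orelor de curs se intersecteaza!"
--     return True, None
-- ===== Notes on version B (the rewrite author's own statement) =====
-- stated objective: alternative
-- what changed: The sort-then-adjacent-scan overlap phase is replaced by a direct pairwise nested-loop overlap test (max(start_i,start_j) < min(end_i,end_j)); no sorted copy is built.
import Mathlib
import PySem

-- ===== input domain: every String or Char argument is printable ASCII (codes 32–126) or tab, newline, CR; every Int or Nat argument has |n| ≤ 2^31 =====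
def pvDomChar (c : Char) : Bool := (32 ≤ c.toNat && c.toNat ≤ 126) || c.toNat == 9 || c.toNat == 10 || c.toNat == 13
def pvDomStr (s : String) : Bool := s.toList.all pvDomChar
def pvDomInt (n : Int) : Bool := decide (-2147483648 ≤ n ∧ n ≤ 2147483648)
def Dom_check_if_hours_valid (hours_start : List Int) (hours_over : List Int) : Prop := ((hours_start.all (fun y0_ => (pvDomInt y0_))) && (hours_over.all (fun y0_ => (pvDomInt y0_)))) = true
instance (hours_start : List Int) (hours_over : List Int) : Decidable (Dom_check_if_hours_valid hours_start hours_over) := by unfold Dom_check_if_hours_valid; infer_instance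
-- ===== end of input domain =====

-- B replaces A's sort-then-adjacent-scan overlap phase by a direct pairwise nested-loop overlap
-- test (objective: alternative algorithm, no sorted copy built); return values agree everywhere.

-- ===== PORT A =====
-- the first for-loop of A (early return on the first pair with hour_s >= hour_o)
def pvALoop1 : List (Int × Int) → Bool
  | [] => false
  | (s, o) :: rest => if s ≥ o then true else pvALoop1 rest

-- A's third loop: for i in range(0, len-1): if interval_list[i+1][0] < interval_list[i][1]
def pvAAdj : List (Int × Int) → Bool
  | a :: b :: t => if b.1 < a.2 then true else pvAAdj (b :: t)
  | _ => false

def check_if_hours_valid (hours_start : List Int) (hours_over : List Int) : Bool × Option String :=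
  if pvALoop1 (hours_start.zip hours_over) then
    (false, some "Ora de inceput a unei ore de curs nu poate fi mai mare decat cea de sfarsit!")
  else if decide (hours_start.length > (PySem.Set.ofList hours_start).length)
          || decide (hours_over.length > (PySem.Set.ofList hours_over).length) then
    (false, some "Nu puteti incepe sau sfarsi doua ore de curs in acelasi timp!")
  else
    let interval_list := hours_start.zip hours_over
    let interval_sorted := PySem.List.sorted interval_list (fun x => x.2) false
    if pvAAdj interval_sorted then
      (false, some "Intervalele orelor de curs se intersecteaza!")
    else (true, none)

-- ===== PORT B =====
-- B's nested loops: for each i, scan all j > i for an overlapping pair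
def pvBPair : List (Int × Int) → Bool
  | [] => false
  | x :: t => if t.any (fun y => max x.1 y.1 < min x.2 y.2) then true else pvBPair t

def check_if_hours_valid_alt (hours_start : List Int) (hours_over : List Int) : Bool × Option String :=
  if (hours_start.zip hours_over).any (fun p => p.1 ≥ p.2) then
    (false, some "Ora de inceput a unei ore de curs nu poate fi mai mare decat cea de sfarsit!")
  else if decide ((PySem.Set.ofList hours_start).length < hours_start.length)
          || decide ((PySem.Set.ofList hours_over).length < hours_over.length) then
    (false, some "Nu puteti incepe sau sfarsi doua ore de curs in acelasi timp!")
  else if pvBPair (hours_start.zip hours_over) then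
    (false, some "Intervalele orelor de curs se intersecteaza!")
  else (true, none)

-- ===== PRECONDITION & SPEC =====
def Spec_check_if_hours_valid (hours_start : List Int) (hours_over : List Int) (out : Bool × Option String) : Prop := out = check_if_hours_valid_alt hours_start hours_over
instance (hours_start : List Int) (hours_over : List Int) (out : Bool × Option String) : Decidable (Spec_check_if_hours_valid hours_start hours_over out) := by unfold Spec_check_if_hours_valid; infer_instance

-- ===== CLAIM (what is proved, stated in full; the proofs are below) =====
def Claim_equal_check_if_hours_valid : Prop := ∀ (hours_start : List Int) (hours_over : List Int), Dom_check_if_hours_valid hours_start hours_over → Spec_check_if_hours_valid hours_start hours_over (check_if_hours_valid hours_start hours_over)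

-- ===== LEMMAS AND PROOFS =====

theorem pvALoop1_eq_any (L : List (Int × Int)) : pvALoop1 L = L.any (fun p => p.1 ≥ p.2) := by
  induction L with
  | nil => rfl
  | cons p t ih => cases p with | mk s o => simp [pvALoop1, ih]

theorem pvBPair_eq_false_iff (L : List (Int × Int)) :
    pvBPair L = false ↔ L.Pairwise (fun x y => ¬ (max x.1 y.1 < min x.2 y.2)) := by
  induction L with
  | nil => simp [pvBPair]
  | cons x t ih =>
    rcases h : t.any (fun y => max x.1 y.1 < min x.2 y.2) with _ | _
    · have he : pvBPair (x :: t) = pvBPair t := by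
        show (if t.any (fun y => max x.1 y.1 < min x.2 y.2) = true then true else pvBPair t) = _
        rw [if_neg (by rw [h]; exact Bool.false_ne_true)]
      rw [he, List.pairwise_cons, ih]
      have hall : ∀ y ∈ t, ¬ (max x.1 y.1 < min x.2 y.2) := by
        intro y hy
        have := List.any_eq_false.mp h y hy
        simpa using this
      exact ⟨fun hp => ⟨hall, hp⟩, fun hp => hp.2⟩
    · have he : pvBPair (x :: t) = true := by
        show (if t.any (fun y => max x.1 y.1 < min x.2 y.2) = true then true else pvBPair t) = _
        rw [if_pos h]
      rw [he, List.pairwise_cons]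
      constructor
      · intro hc; cases hc
      · rintro ⟨hall, -⟩
        rcases List.any_eq_true.mp h with ⟨y, hy, hov⟩
        exact absurd (of_decide_eq_true hov) (hall y hy)

theorem pvBPair_perm {L₁ L₂ : List (Int × Int)} (hp : L₁.Perm L₂) : pvBPair L₁ = pvBPair L₂ := by
  have hsym : Symmetric (fun (x y : Int × Int) => ¬ (max x.1 y.1 < min x.2 y.2)) := by
    intro x y h
    rw [max_comm, min_comm]; exact h
  have hiff : pvBPair L₁ = false ↔ pvBPair L₂ = false := by
    rw [pvBPair_eq_false_iff, pvBPair_eq_false_iff]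
    exact List.Perm.pairwise_iff (fun {x y} h => hsym h) hp
  cases h2 : pvBPair L₂ with
  | false => exact hiff.mpr h2
  | true =>
    cases h1 : pvBPair L₁ with
    | false => exact absurd (hiff.mp h1) (by simp [h2])
    | true => rfl

-- if the adjacent scan finds nothing and every interval is nonempty, every later start is ≥ the head's end
theorem pvAAdj_headLe (a : Int × Int) (l : List (Int × Int))
    (hadj : pvAAdj (a :: l) = false) (hne : ∀ p ∈ a :: l, p.1 < p.2) :
    ∀ y ∈ l, a.2 ≤ y.1 := by
  induction l generalizing a with
  | nil => intro y hy; cases hy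
  | cons b t ih =>
    have hb : ¬ (b.1 < a.2) := by
      intro hlt; simp [pvAAdj, hlt] at hadj
    have hrest : pvAAdj (b :: t) = false := by
      simpa [pvAAdj, hb] using hadj
    intro y hy
    rcases List.mem_cons.mp hy with rfl | hy
    · omega
    · have h1 : b.2 ≤ y.1 := ih b hrest (fun p hp => hne p (List.mem_cons_of_mem a hp)) y hy
      have h2 : b.1 < b.2 := hne b (by simp)
      omega

-- the crux: on a list of nonempty intervals sorted by end, the adjacent scan equals the pairwise scan
theorem pvAAdj_eq_pvBPair (S : List (Int × Int))
    (hsort : S.Pairwise (fun a b => a.2 ≤ b.2)) (hne : ∀ p ∈ S, p.1 < p.2) :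
    pvAAdj S = pvBPair S := by
  induction S with
  | nil => rfl
  | cons a l ih =>
    cases l with
    | nil => simp [pvAAdj, pvBPair]
    | cons b t =>
      have hab : a.2 ≤ b.2 := (List.pairwise_cons.mp hsort).1 b (by simp)
      have hsort' : (b :: t).Pairwise (fun a b => a.2 ≤ b.2) := (List.pairwise_cons.mp hsort).2
      have hne' : ∀ p ∈ b :: t, p.1 < p.2 := fun p hp => hne p (List.mem_cons_of_mem a hp)
      have eA : pvAAdj (a :: b :: t) = if b.1 < a.2 then true else pvAAdj (b :: t) := rfl
      have eB : pvBPair (a :: b :: t)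
          = if (b :: t).any (fun y => max a.1 y.1 < min a.2 y.2) = true then true
            else pvBPair (b :: t) := rfl
      by_cases hb : b.1 < a.2
      · have ha : a.1 < a.2 := hne a (by simp)
        have hov : max a.1 b.1 < min a.2 b.2 := by omega
        have hany : (b :: t).any (fun y => max a.1 y.1 < min a.2 y.2) = true :=
          List.any_eq_true.mpr ⟨b, by simp, decide_eq_true hov⟩
        rw [eA, eB, if_pos hb, if_pos hany]
      · rw [eA, eB, if_neg hb]
        cases hrec : pvAAdj (b :: t) with
        | false =>
          have hadj : pvAAdj (a :: b :: t) = false := by rw [eA, if_neg hb, hrec]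
          have hle := pvAAdj_headLe a (b :: t) hadj hne
          have hany : (b :: t).any (fun y => max a.1 y.1 < min a.2 y.2) = false := by
            rw [List.any_eq_false]
            intro y hy
            have h1 : a.2 ≤ y.1 := hle y hy
            simp only [decide_eq_true_eq]
            omega
          rw [if_neg (by rw [hany]; exact Bool.false_ne_true), ← ih hsort' hne', hrec]
        | true =>
          have hpb : pvBPair (b :: t) = true := by rw [← ih hsort' hne', hrec]
          by_cases hc : (b :: t).any (fun y => max a.1 y.1 < min a.2 y.2) = true
          · rw [if_pos hc]
          · rw [if_neg hc, hpb]

-- ===== VERDICT (by name: the statement is the Claim_ definition above) =====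
theorem check_if_hours_valid_spec : Claim_equal_check_if_hours_valid := by
  intro hs ho _dom
  unfold Spec_check_if_hours_valid check_if_hours_valid check_if_hours_valid_alt
  rw [pvALoop1_eq_any]
  by_cases h1 : (hs.zip ho).any (fun p => p.1 ≥ p.2) = true
  · simp [h1]
  · have h1' : (hs.zip ho).any (fun p => p.1 ≥ p.2) = false := by
      simpa using h1
    have hne : ∀ p ∈ hs.zip ho, p.1 < p.2 := by
      intro p hp
      have := List.any_eq_false.mp h1' p hp
      simp only [decide_eq_true_eq] at this
      omega
    have hS := PySem.List.sorted_pairwise (xs := hs.zip ho) (key := fun x => x.2)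
    have hneS : ∀ p ∈ PySem.List.sorted (hs.zip ho) (fun x => x.2) false, p.1 < p.2 := by
      intro p hp
      exact hne p ((PySem.List.mem_sorted _ _ _ _).mp hp)
    have hmain : pvAAdj (PySem.List.sorted (hs.zip ho) (fun x => x.2) false)
        = pvBPair (hs.zip ho) := by
      rw [pvAAdj_eq_pvBPair _ hS hneS]
      exact pvBPair_perm (PySem.List.sorted_perm _ _ _)
    simp [h1', hmain]
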